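-- pv_equiv track=rewrite | github.com/MrBrantCode/unitest_baseline | mut_generate/mist_train_cf/cf_75813/solution.py | primeWithPrimeDigitSum
-- ===== SOURCE A (Python) =====
-- def isprime(n):
--     if n <= 1:
--         return False
--     elif n <= 3:
--         return True
--     elif n % 2 == 0 or n % 3 == 0:
--         return False
--     i = 5
--     while i * i <= n:
--         if n % i == 0 or n % (i + 2) == 0:
--             return False
--         i += 6
--     return True
--
-- def digitSum(n):
--     digitSum = 0
--     while n:
--         digitSum += n % 10
--         n //= 10
--     return digitSum
--
-- def primeWithPrimeDigitSum(lst):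
--     maxPrime = 0
--     sumDigits = 0
--     for i in lst:
--         if isprime(i):
--             digit_sum = digitSum(i)
--             if isprime(digit_sum) and i > maxPrime:
--                 maxPrime = i
--                 sumDigits = digit_sum
--     if maxPrime == 0:
--         return None
--     else:
--         return (maxPrime, sumDigits)
-- ===== SOURCE B (Python) =====
-- def is_prime(n):
--     # plain trial division by every d with d*d <= n
--     if n < 2:
--         return False
--     d = 2
--     while d * d <= n:
--         if n % d == 0:
--             return False
--         d += 1
--     return True
--
-- def digit_sum(n):
--     # recursive digit sum (only ever called on positive primes)
--     return 0 if n == 0 else n % 10 + digit_sum(n // 10)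
--
-- def primeWithPrimeDigitSum(lst):
--     for i in sorted(lst, reverse=True):
--         if is_prime(i):
--             d = digit_sum(i)
--             if is_prime(d):
--                 return (i, d)
--     return None
-- ===== Notes on version B (the rewrite author's own statement) =====
-- stated objective: alternative
-- what changed: Replaces the running-maximum accumulator pass with a descending sort plus early-return first-match scan, swaps the 6k+-1 wheel primality test for plain step-1 trial division, and computes the digit sum recursively instead of with a while-loop accumulator.
import Mathlib
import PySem

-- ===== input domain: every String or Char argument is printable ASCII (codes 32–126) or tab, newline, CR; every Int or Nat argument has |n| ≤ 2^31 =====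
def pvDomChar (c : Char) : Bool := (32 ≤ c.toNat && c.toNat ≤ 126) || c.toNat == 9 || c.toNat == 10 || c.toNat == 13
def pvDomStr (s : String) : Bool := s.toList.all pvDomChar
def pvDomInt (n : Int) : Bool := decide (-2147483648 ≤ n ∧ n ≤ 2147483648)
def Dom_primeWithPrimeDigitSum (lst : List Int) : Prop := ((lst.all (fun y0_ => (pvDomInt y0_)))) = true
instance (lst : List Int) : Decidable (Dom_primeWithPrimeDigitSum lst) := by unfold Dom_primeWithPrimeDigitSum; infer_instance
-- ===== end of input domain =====

-- B sorts descending and returns the first qualifying element (vs A's running-maximum fold),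
-- tests primality by plain step-1 trial division (vs A's 6k±1 wheel) and sums digits by
-- recursion (vs A's while-loop accumulator); same cost class ("alternative", not faster).


-- ===== PORT A =====
-- the 'while i * i <= n' 6k±1 trial-division loop of isprime
def pvIspLoop (n i : Int) : Bool :=
  if _h : i * i ≤ n then
    if PySem.Int.mod n i = 0 ∨ PySem.Int.mod n (i + 2) = 0 then false
    else pvIspLoop n (i + 6)
  else true
termination_by (n + 1 - i).toNat
decreasing_by
  have hi : i ≤ n := by
    rcases (by omega : i ≤ 0 ∨ 0 < i) with h0 | h0
    · nlinarith
    · nlinarith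
  omega

def pvIsprime (n : Int) : Bool :=
  if n ≤ 1 then false
  else if n ≤ 3 then true
  else if PySem.Int.mod n 2 = 0 ∨ PySem.Int.mod n 3 = 0 then false
  else pvIspLoop n 5

-- the 'while n:' digit loop. Python's loop never terminates for n < 0; both programs only
-- call this on primes (n ≥ 2), where 'n != 0' and '0 < n' coincide, so this is exact there.
def pvDsLoop (n acc : Int) : Int :=
  if _h : 0 < n then pvDsLoop (PySem.Int.floordiv n 10) (acc + PySem.Int.mod n 10) else acc
termination_by n.toNat
decreasing_by
  rw [PySem.Int.floordiv_eq_ediv_of_pos (by omega)]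
  omega

def pvDigitSum (n : Int) : Int := pvDsLoop n 0

def primeWithPrimeDigitSum (lst : List Int) : Option (Int × Int) :=
  let st := lst.foldl (fun (s : Int × Int) i =>
      if pvIsprime i then
        let d := pvDigitSum i
        if pvIsprime d && decide (i > s.1) then (i, d) else s
      else s) (0, 0)
  if st.1 = 0 then none else some (st.1, st.2)

-- ===== PORT B =====
-- B's is_prime: the 'while d * d <= n' step-1 trial-division loop
def pvTrialB (n d : Int) : Bool :=
  if _h : d * d ≤ n then
    if PySem.Int.mod n d = 0 then false else pvTrialB n (d + 1)
  else true
termination_by (n + 1 - d).toNat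
decreasing_by
  have hd : d ≤ n := by
    rcases (by omega : d ≤ 0 ∨ 0 < d) with h0 | h0
    · nlinarith
    · nlinarith
  omega

def pvIsPrimeB (n : Int) : Bool :=
  if n < 2 then false else pvTrialB n 2

-- B's digit_sum: 'return 0 if n == 0 else n % 10 + digit_sum(n // 10)'. The Python recursion
-- never terminates for n < 0; it is only ever called on positive primes, where it is exact.
def pvDsRecB (n : Int) : Int :=
  if _h : 0 < n then PySem.Int.mod n 10 + pvDsRecB (PySem.Int.floordiv n 10) else 0
termination_by n.toNat
decreasing_by
  rw [PySem.Int.floordiv_eq_ediv_of_pos (by omega)]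
  omega

-- the 'for i in sorted(lst, reverse=True): … return (i, d)' loop with early return
def pvFirstMatch : List Int → Option (Int × Int)
  | [] => none
  | i :: rest =>
    if pvIsPrimeB i then
      let d := pvDsRecB i
      if pvIsPrimeB d then some (i, d) else pvFirstMatch rest
    else pvFirstMatch rest

def primeWithPrimeDigitSum_alt (lst : List Int) : Option (Int × Int) :=
  pvFirstMatch (PySem.List.sorted lst (fun x => x) true)

-- ===== PRECONDITION & SPEC =====
def Spec_primeWithPrimeDigitSum (lst : List Int) (out : Option (Int × Int)) : Prop := out = primeWithPrimeDigitSum_alt lst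
instance (lst : List Int) (out : Option (Int × Int)) : Decidable (Spec_primeWithPrimeDigitSum lst out) := by unfold Spec_primeWithPrimeDigitSum; infer_instance

-- ===== CLAIM (what is proved, stated in full; the proofs are below) =====
def Claim_equal_primeWithPrimeDigitSum : Prop := ∀ (lst : List Int), Dom_primeWithPrimeDigitSum lst → Spec_primeWithPrimeDigitSum lst (primeWithPrimeDigitSum lst)

-- ===== LEMMAS AND PROOFS =====

-- digit sums agree: A's accumulator loop vs B's recursion
theorem pvDsLoop_eq : ∀ (n acc : Int), pvDsLoop n acc = acc + pvDsRecB n := by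
  intro n
  induction n using pvDsRecB.induct with
  | case1 n h ih =>
    intro acc
    rw [pvDsLoop, pvDsRecB]
    simp only [dif_pos h, ih]
    ring
  | case2 n h =>
    intro acc
    rw [pvDsLoop, pvDsRecB]
    simp [h]

theorem pvDigitSum_eq (n : Int) : pvDigitSum n = pvDsRecB n := by
  unfold pvDigitSum; rw [pvDsLoop_eq]; ring

-- common primality spec: no divisor k with 2 ≤ k and k*k ≤ n
def NoDiv (n : Int) : Prop := ∀ k : Int, 2 ≤ k → k * k ≤ n → ¬ k ∣ n

theorem pvTrialB_iff : ∀ (n d : Int), 0 ≤ d →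
    (pvTrialB n d = true ↔ ∀ k, d ≤ k → k * k ≤ n → ¬ k ∣ n) := by
  intro n d
  induction d using pvTrialB.induct (n := n) with
  | case1 d h hmod =>
    intro _
    have hdvd : d ∣ n := (PySem.Int.mod_eq_zero_iff_dvd n d).mp hmod
    rw [pvTrialB]
    simp only [dif_pos h, if_pos hmod, Bool.false_eq_true, false_iff]
    intro hall
    exact hall d le_rfl h hdvd
  | case2 d h hmod ih =>
    intro hd
    rw [pvTrialB]
    simp only [dif_pos h, if_neg hmod]
    rw [ih (by omega)]
    constructor
    · intro hall k hk hkk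
      rcases (by omega : k = d ∨ d + 1 ≤ k) with rfl | hk1
      · exact fun hdvd => hmod ((PySem.Int.mod_eq_zero_iff_dvd n k).mpr hdvd)
      · exact hall k hk1 hkk
    · intro hall k hk hkk; exact hall k (by omega) hkk
  | case3 d h =>
    intro hd
    rw [pvTrialB, dif_neg h]
    refine ⟨fun _ k hk hkk hdvd => ?_, fun _ => rfl⟩
    have : d * d ≤ k * k := by nlinarith
    omega

theorem pvIsPrimeB_iff (n : Int) : pvIsPrimeB n = true ↔ 2 ≤ n ∧ NoDiv n := by
  unfold pvIsPrimeB
  by_cases h : n < 2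
  · simp [h]
  · rw [if_neg h, pvTrialB_iff n 2 (by omega)]

    unfold NoDiv
    constructor
    · intro hall; exact ⟨by omega, hall⟩
    · intro ⟨_, hall⟩; exact hall

theorem pvIspLoop_iff : ∀ (n i : Int), 3 < n → ¬ (2:Int) ∣ n → ¬ (3:Int) ∣ n → 5 ≤ i →
    i % 6 = 5 → (∀ k, 2 ≤ k → k < i → ¬ k ∣ n) →
    (pvIspLoop n i = true ↔ NoDiv n) := by
  intro n i
  induction i using pvIspLoop.induct (n := n) with
  | case1 i h hmod =>
    intro _ h2 h3 hi5 _ _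
    rw [pvIspLoop]
    simp only [dif_pos h, if_pos hmod, Bool.false_eq_true, false_iff]
    intro hnd
    rcases hmod with hm | hm
    · exact hnd i (by omega) h ((PySem.Int.mod_eq_zero_iff_dvd n i).mp hm)
    · have hdvd : (i + 2) ∣ n := (PySem.Int.mod_eq_zero_iff_dvd n (i + 2)).mp hm
      by_cases hbig : (i + 2) * (i + 2) ≤ n
      · exact hnd (i + 2) (by omega) hbig hdvd
      · obtain ⟨m, hm'⟩ := hdvd
        have hn5 : 5 * i ≤ n := by nlinarith
        have hmge : 2 ≤ m := by nlinarith
        have hmlt : m < i + 2 := by nlinarith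
        have hmm : m * m ≤ n := by nlinarith
        exact hnd m hmge hmm ⟨i + 2, by linarith [hm']⟩
  | case2 i h hmod ih =>
    intro hn h2 h3 hi5 hi6 hpre
    rw [pvIspLoop]
    simp only [dif_pos h, if_neg hmod]
    have hni : ¬ i ∣ n := fun hd => hmod (Or.inl ((PySem.Int.mod_eq_zero_iff_dvd n i).mpr hd))
    have hni2 : ¬ (i + 2) ∣ n := fun hd => hmod (Or.inr ((PySem.Int.mod_eq_zero_iff_dvd n (i + 2)).mpr hd))
    apply ih hn h2 h3 (by omega) (by omega)
    intro k hk2 hki6 hkdvd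
    rcases (by omega : k < i ∨ k = i ∨ k = i + 1 ∨ k = i + 2 ∨ k = i + 3 ∨ k = i + 4 ∨ k = i + 5)
      with hc | rfl | rfl | rfl | rfl | rfl | rfl
    · exact hpre k hk2 hc hkdvd
    · exact hni hkdvd
    · exact h2 (dvd_trans (Int.dvd_of_emod_eq_zero (by omega)) hkdvd)
    · exact hni2 hkdvd
    · exact h2 (dvd_trans (Int.dvd_of_emod_eq_zero (by omega)) hkdvd)
    · exact h3 (dvd_trans (Int.dvd_of_emod_eq_zero (by omega)) hkdvd)
    · exact h2 (dvd_trans (Int.dvd_of_emod_eq_zero (by omega)) hkdvd)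
  | case3 i h =>
    intro hn h2 h3 hi5 _ hpre
    rw [pvIspLoop, dif_neg h]
    refine ⟨fun _ k hk2 hkk hkdvd => ?_, fun _ => rfl⟩
    have hki : k < i := by nlinarith
    exact hpre k hk2 hki hkdvd

theorem pvIsprime_iff (n : Int) : pvIsprime n = true ↔ 2 ≤ n ∧ NoDiv n := by
  unfold pvIsprime
  by_cases h1 : n ≤ 1
  · simp [h1]
  · rw [if_neg h1]
    by_cases h2 : n ≤ 3
    · rw [if_pos h2]
      refine ⟨fun _ => ⟨by omega, fun k hk hkk hkd => by nlinarith⟩, fun _ => rfl⟩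
    · rw [if_neg h2]
      by_cases h23 : PySem.Int.mod n 2 = 0 ∨ PySem.Int.mod n 3 = 0
      · simp only [if_pos h23, Bool.false_eq_true, false_iff]
        rintro ⟨-, hnd⟩
        rcases h23 with hm | hm
        · exact hnd 2 le_rfl (by omega) ((PySem.Int.mod_eq_zero_iff_dvd n 2).mp hm)
        · have hd3 : (3:Int) ∣ n := (PySem.Int.mod_eq_zero_iff_dvd n 3).mp hm
          obtain ⟨c, hc⟩ := hd3
          by_cases he : (2:Int) ∣ n
          · exact hnd 2 le_rfl (by omega) he
          · have hc3 : 3 ≤ c := by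
              rcases (by omega : c ≤ 1 ∨ c = 2 ∨ 3 ≤ c) with h | h | h
              · omega
              · exact absurd ⟨3, by omega⟩ he
              · exact h
            exact hnd 3 (by omega) (by nlinarith) ⟨c, hc⟩
      · rw [if_neg h23]
        push_neg at h23
        have hd2 : ¬ (2:Int) ∣ n := fun hd => h23.1 ((PySem.Int.mod_eq_zero_iff_dvd n 2).mpr hd)
        have hd3 : ¬ (3:Int) ∣ n := fun hd => h23.2 ((PySem.Int.mod_eq_zero_iff_dvd n 3).mpr hd)
        rw [pvIspLoop_iff n 5 (by omega) hd2 hd3 (by omega) (by decide) ?_]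
        · constructor
          · intro hnd; exact ⟨by omega, hnd⟩
          · intro ⟨_, hnd⟩; exact hnd
        · intro k hk2 hk5 hkdvd
          rcases (by omega : k = 2 ∨ k = 3 ∨ k = 4) with rfl | rfl | rfl
          · exact hd2 hkdvd
          · exact hd3 hkdvd
          · exact hd2 (dvd_trans ⟨2, rfl⟩ hkdvd)

-- the two primality tests agree pointwise
theorem pvIsprime_eq (n : Int) : pvIsprime n = pvIsPrimeB n := by
  have hA := pvIsprime_iff n
  have hB := pvIsPrimeB_iff n
  cases hA' : pvIsprime n <;> cases hB' : pvIsPrimeB n <;> simp_all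

-- "qualifying" elements: prime with a prime digit sum (stated via A's helpers)
def pvQual (i : Int) : Bool := pvIsprime i && pvIsprime (pvDigitSum i)

-- A's fold step
def pvStepA (s : Int × Int) (i : Int) : Int × Int :=
  if pvIsprime i then
    let d := pvDigitSum i
    if pvIsprime d && decide (i > s.1) then (i, d) else s
  else s

theorem pvStepA_eq (s : Int × Int) (i : Int) :
    pvStepA s i = if pvQual i && decide (s.1 < i) then (i, pvDigitSum i) else s := by
  unfold pvStepA pvQual
  by_cases h1 : pvIsprime i = true <;> simp [h1, GT.gt]

theorem pvIsprime_pos {n : Int} (h : pvIsprime n = true) : 1 < n := by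
  unfold pvIsprime at h
  split_ifs at h with h1 h2 h3 <;> omega

theorem pvQual_pos {n : Int} (h : pvQual n = true) : 1 < n := by
  unfold pvQual at h
  exact pvIsprime_pos (by simpa using (Bool.and_eq_true_iff.mp h).1)

theorem pvFoldA_stay (lst : List Int) : ∀ s : Int × Int,
    (∀ x ∈ lst, pvQual x = true → x ≤ s.1) → lst.foldl pvStepA s = s := by
  induction lst with
  | nil => intro s _; rfl
  | cons i t ih =>
    intro s hb
    have hstep : pvStepA s i = s := by
      rw [pvStepA_eq]
      by_cases hq : pvQual i = true
      · have := hb i (by simp) hq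
        simp [hq]; omega
      · simp [hq]
    simp only [List.foldl_cons, hstep]
    exact ih s (fun x hx => hb x (by simp [hx]))

theorem pvFoldA_max (lst : List Int) : ∀ s : Int × Int,
    (∃ x ∈ lst, pvQual x = true ∧ s.1 < x) →
    ∃ m, m ∈ lst ∧ pvQual m = true ∧ lst.foldl pvStepA s = (m, pvDigitSum m) ∧
      (∀ x ∈ lst, pvQual x = true → x ≤ m) ∧ s.1 < m := by
  induction lst with
  | nil => intro s ⟨x, hx, _⟩; exact absurd hx (by simp)
  | cons i t ih =>
    intro s ⟨x, hx, hqx, hsx⟩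
    by_cases hc : pvQual i = true ∧ s.1 < i
    · have hstep : pvStepA s i = (i, pvDigitSum i) := by
        rw [pvStepA_eq]; simp [hc.1, hc.2]
      simp only [List.foldl_cons, hstep]
      by_cases hex : ∃ y ∈ t, pvQual y = true ∧ i < y
      · obtain ⟨m, hm, hqm, heq, hbnd, hlt⟩ := ih (i, pvDigitSum i) (by simpa using hex)
        refine ⟨m, by simp [hm], hqm, heq, ?_, by simp at hlt; omega⟩
        intro y hy hqy
        rcases List.mem_cons.mp hy with rfl | hy
        · simp at hlt; omega
        · exact hbnd y hy hqy
      · push_neg at hex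
        have : t.foldl pvStepA (i, pvDigitSum i) = (i, pvDigitSum i) := by
          apply pvFoldA_stay
          intro y hy hqy
          have := hex y hy hqy
          omega
        refine ⟨i, by simp, hc.1, this, ?_, hc.2⟩
        intro y hy hqy
        rcases List.mem_cons.mp hy with rfl | hy
        · omega
        · have := hex y hy hqy; omega
    · have hstep : pvStepA s i = s := by
        rw [pvStepA_eq]
        rcases Decidable.not_and_iff_or_not.mp hc with h | h
        · simp [Bool.eq_false_iff.mpr h]
        · simp; omega
      simp only [List.foldl_cons, hstep]
      have hxt : x ∈ t := by
        rcases List.mem_cons.mp hx with rfl | hxt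
        · exact absurd ⟨hqx, hsx⟩ hc
        · exact hxt
      obtain ⟨m, hm, hqm, heq, hbnd, hlt⟩ := ih s ⟨x, hxt, hqx, hsx⟩
      refine ⟨m, by simp [hm], hqm, heq, ?_, hlt⟩
      intro y hy hqy
      rcases List.mem_cons.mp hy with rfl | hy
      · have : ¬ s.1 < y := fun h' => hc ⟨hqy, h'⟩
        omega
      · exact hbnd y hy hqy

-- B's first-match scan, rewritten in terms of pvQual via the helper-equality lemmas
theorem pvFirstMatch_cons (i : Int) (t : List Int) :
    pvFirstMatch (i :: t) = if pvQual i then some (i, pvDigitSum i) else pvFirstMatch t := by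
  unfold pvQual
  rw [show pvFirstMatch (i :: t) =
      (if pvIsPrimeB i then
        if pvIsPrimeB (pvDsRecB i) then some (i, pvDsRecB i) else pvFirstMatch t
      else pvFirstMatch t) from rfl]
  rw [← pvIsprime_eq, ← pvDigitSum_eq, ← pvIsprime_eq]
  by_cases h1 : pvIsprime i = true <;> by_cases h2 : pvIsprime (pvDigitSum i) = true <;>
    simp [h1, h2]

theorem pvFirstMatch_char (l : List Int) (hp : l.Pairwise (fun a b => b ≤ a)) :
    (pvFirstMatch l = none ∧ ∀ x ∈ l, pvQual x = false) ∨
    (∃ i, i ∈ l ∧ pvQual i = true ∧ pvFirstMatch l = some (i, pvDigitSum i) ∧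
      ∀ x ∈ l, pvQual x = true → x ≤ i) := by
  induction l with
  | nil => exact Or.inl ⟨rfl, by simp⟩
  | cons i t ih =>
    have hhead := (List.pairwise_cons.mp hp).1
    have ht := (List.pairwise_cons.mp hp).2
    rw [pvFirstMatch_cons]
    by_cases hq : pvQual i = true
    · refine Or.inr ⟨i, by simp, hq, by simp [hq], ?_⟩
      intro y hy _
      rcases List.mem_cons.mp hy with rfl | hy
      · omega
      · exact hhead y hy
    · rcases ih ht with ⟨hn, hall⟩ | ⟨j, hj, hqj, heq, hbnd⟩
      · refine Or.inl ⟨by simp [hq, hn], ?_⟩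
        intro y hy
        rcases List.mem_cons.mp hy with rfl | hy
        · exact Bool.eq_false_iff.mpr hq
        · exact hall y hy
      · refine Or.inr ⟨j, by simp [hj], hqj, by simp [hq, heq], ?_⟩
        intro y hy hqy
        rcases List.mem_cons.mp hy with rfl | hy
        · exact absurd hqy hq
        · exact hbnd y hy hqy

-- ===== VERDICT (by name: the statement is the Claim_ definition above) =====
theorem primeWithPrimeDigitSum_spec : Claim_equal_primeWithPrimeDigitSum := by
  intro lst _hdom
  unfold Spec_primeWithPrimeDigitSum primeWithPrimeDigitSum primeWithPrimeDigitSum_alt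
  have hA : lst.foldl (fun (s : Int × Int) i =>
      if pvIsprime i then
        let d := pvDigitSum i
        if pvIsprime d && decide (i > s.1) then (i, d) else s
      else s) (0, 0) = lst.foldl pvStepA (0, 0) := rfl
  rw [hA]
  have hmem : ∀ x, x ∈ PySem.List.sorted lst (fun x => x) true ↔ x ∈ lst := by
    intro x; exact PySem.List.mem_sorted lst (fun x => x) true x
  have hpair : (PySem.List.sorted lst (fun x => x) true).Pairwise (fun a b => b ≤ a) :=
    PySem.List.sorted_pairwise_rev lst (fun x => x)
  rcases pvFirstMatch_char _ hpair with ⟨hn, hall⟩ | ⟨j, hj, hqj, heq, hbnd⟩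
  · -- no qualifying element anywhere
    have hnone : ∀ x ∈ lst, pvQual x = true → x ≤ (0, 0).1 := by
      intro x hx hqx
      have := hall x ((hmem x).mpr hx)
      simp [hqx] at this
    rw [pvFoldA_stay lst (0, 0) hnone, hn]
    simp
  · -- B finds the first (= largest) qualifying element of the sorted list
    have hjl : j ∈ lst := (hmem j).mp hj
    obtain ⟨m, hm, hqm, heqA, hbndA, _⟩ :=
      pvFoldA_max lst (0, 0) ⟨j, hjl, hqj, by have := pvQual_pos hqj; simpa using by omega⟩
    have hmj : m = j := by
      have h1 : m ≤ j := hbnd m ((hmem m).mpr hm) hqm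
      have h2 : j ≤ m := hbndA j hjl hqj
      omega
    rw [heqA, heq, hmj]
    have : (1:Int) < j := pvQual_pos hqj
    simp
    omega
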